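-- pv_equiv track=rewrite | github.com/Lilith-Milante/LessonsPy_Chmonya | Lesson3_HW/Lesson3_HW.py | fibonacci_nums
-- ===== SOURCE A (Python) =====
-- def fibonacci_nums(num):
--     f_nums = []
--     num_1, num_2 = 1, 1
--     for i in range(num):
--         f_nums.append(num_1)
--         num_1, num_2 = num_2, num_1 + num_2
--
--     num_1, num_2 = 0, 1
--     for i in range (num + 1):
--         f_nums.insert(0, num_1)
--         num_1, num_2 = num_2, num_1 - num_2
--     return f_nums
-- ===== SOURCE B (Python) =====
-- def fibonacci_nums(num):
--     # One forward Fibonacci table F(0..num); the backward half is derived from it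
--     # via the negafibonacci identity F(-j) = (-1)**(j+1) * F(j), no second recurrence.
--     fibs = []
--     a, b = 0, 1
--     for _ in range(num + 1):
--         fibs.append(a)
--         a, b = b, a + b
--     neg = [(-1) ** (j + 1) * fibs[j] for j in range(num, 0, -1)]
--     return neg + fibs
-- ===== Notes on version B (the rewrite author's own statement) =====
-- stated objective: faster
-- what changed: B builds one forward Fibonacci table F(0..num) by appending and derives the backward half from it via the negafibonacci sign identity F(-j)=(-1)**(j+1)*F(j), replacing A's second subtraction recurrence that performs num+1 insertions at the front of the list.
import Mathlib
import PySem

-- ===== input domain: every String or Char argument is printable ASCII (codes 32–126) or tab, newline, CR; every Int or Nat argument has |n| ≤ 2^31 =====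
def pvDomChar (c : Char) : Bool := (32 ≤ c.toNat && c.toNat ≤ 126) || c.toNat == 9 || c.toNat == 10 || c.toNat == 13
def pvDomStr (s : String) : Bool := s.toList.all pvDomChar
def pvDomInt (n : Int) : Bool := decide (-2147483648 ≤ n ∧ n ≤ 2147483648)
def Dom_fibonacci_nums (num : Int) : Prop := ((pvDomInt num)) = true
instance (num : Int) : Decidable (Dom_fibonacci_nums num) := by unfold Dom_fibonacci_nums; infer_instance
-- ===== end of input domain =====

-- B replaces A's backward subtraction recurrence (with quadratic front-insertions) by one
-- forward Fibonacci table whose mirror is obtained via the negafibonacci sign identity.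

-- ===== PORT A =====
def fibonacci_nums (num : Int) : List Int :=
  -- f_nums = []; num_1, num_2 = 1, 1; for i in range(num): append; shift
  let s1 := (PySem.List.pyRange 0 num 1).foldl
      (fun (st : List Int × Int × Int) _ => (st.1 ++ [st.2.1], st.2.2, st.2.1 + st.2.2))
      ([], 1, 1)
  -- num_1, num_2 = 0, 1; for i in range(num + 1): insert(0, num_1); shift
  let s2 := (PySem.List.pyRange 0 (num + 1) 1).foldl
      (fun (st : List Int × Int × Int) _ => (st.2.1 :: st.1, st.2.2, st.2.1 - st.2.2))
      (s1.1, 0, 1)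
  s2.1

-- ===== PORT B =====
def fibonacci_nums_alt (num : Int) : List Int :=
  -- fibs = []; a, b = 0, 1; for _ in range(num + 1): fibs.append(a); a, b = b, a + b
  let s := (PySem.List.pyRange 0 (num + 1) 1).foldl
      (fun (st : List Int × Int × Int) _ => (st.1 ++ [st.2.1], st.2.2, st.2.1 + st.2.2))
      ([], 0, 1)
  let fibs := s.1
  -- neg = [(-1) ** (j + 1) * fibs[j] for j in range(num, 0, -1)]
  -- every j in the range satisfies 1 ≤ j ≤ num < len(fibs), so fibs[j] never raises
  let neg := (PySem.List.pyRange num 0 (-1)).map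
      (fun j => (-1) ^ (j + 1).toNat * PySem.List.pyGetD fibs j 0)
  neg ++ fibs

-- ===== PRECONDITION & SPEC =====
def Spec_fibonacci_nums (num : Int) (out : List Int) : Prop := out = fibonacci_nums_alt num
instance (num : Int) (out : List Int) : Decidable (Spec_fibonacci_nums num out) := by unfold Spec_fibonacci_nums; infer_instance

-- ===== CLAIM (what is proved, stated in full; the proofs are below) =====
def Claim_equal_fibonacci_nums : Prop := ∀ (num : Int), Dom_fibonacci_nums num → Spec_fibonacci_nums num (fibonacci_nums num)

-- ===== LEMMAS AND PROOFS =====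

-- fibonacci as an Int-valued function, and the negafibonacci values N k = F(-k)
def pvF (k : Nat) : Int := Nat.fib k
def pvN (k : Nat) : Int := (-1) ^ (k + 1) * pvF k

-- A fold that ignores the list elements is an iterate of its step
theorem pv_foldl_const {α β : Type} (f : β → β) :
    ∀ (l : List α) (st : β), l.foldl (fun s _ => f s) st = f^[l.length] st := by
  intro l
  induction l with
  | nil => intro st; rfl
  | cons x xs ih => intro st; simp [List.foldl_cons, Function.iterate_succ_apply, ih]

def pvStepA (st : List Int × Int × Int) : List Int × Int × Int :=
  (st.1 ++ [st.2.1], st.2.2, st.2.1 + st.2.2)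

def pvStepB (st : List Int × Int × Int) : List Int × Int × Int :=
  (st.2.1 :: st.1, st.2.2, st.2.1 - st.2.2)

theorem pv_iterA : ∀ (m k : Nat) (l : List Int),
    pvStepA^[m] (l, pvF k, pvF (k + 1)) =
      (l ++ (List.range m).map (fun i => pvF (k + i)), pvF (k + m), pvF (k + m + 1)) := by
  intro m
  induction m with
  | zero => intro k l; simp
  | succ m ih =>
    intro k l
    rw [Function.iterate_succ_apply]
    have hstep : pvStepA (l, pvF k, pvF (k + 1)) = (l ++ [pvF k], pvF (k + 1), pvF (k + 2)) := by
      simp [pvStepA, pvF, Nat.fib_add_two]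
    rw [hstep, ih (k + 1) (l ++ [pvF k])]
    refine Prod.ext ?_ (Prod.ext (by simp; try ring_nf) (by simp; try ring_nf))
    simp [List.range_succ_eq_map, List.map_map, List.append_assoc, Function.comp]
    intro i _; congr 1; omega

theorem pv_iterB : ∀ (m k : Nat) (l : List Int),
    pvStepB^[m] (l, pvN k, (-1) ^ k * pvF (k + 1)) =
      (((List.range m).map (fun i => pvN (k + i))).reverse ++ l,
        pvN (k + m), (-1) ^ (k + m) * pvF (k + m + 1)) := by
  intro m
  induction m with
  | zero => intro k l; simp
  | succ m ih =>
    intro k l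
    rw [Function.iterate_succ_apply]
    have hstep : pvStepB (l, pvN k, (-1) ^ k * pvF (k + 1)) =
        (pvN k :: l, pvN (k + 1), (-1) ^ (k + 1) * pvF (k + 2)) := by
      simp [pvStepB, pvN, pvF, Nat.fib_add_two]; constructor
      · ring
      · ring
    rw [hstep, ih (k + 1) (pvN k :: l)]
    refine Prod.ext ?_ (Prod.ext (by simp; try ring_nf) (by simp; try ring_nf))
    simp [List.range_succ_eq_map, List.map_map, Function.comp]
    intro i _; congr 1; omega

-- reversing a map over a range re-indexes it back to front
theorem pv_reverse_map_range (g : Nat → Int) :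
    ∀ m, ((List.range m).map g).reverse = (List.range m).map (fun k => g (m - 1 - k)) := by
  intro m
  induction m with
  | zero => simp
  | succ m ih =>
    conv_lhs => rw [List.range_succ]
    conv_rhs => rw [List.range_succ_eq_map]
    simp [ih]
    intro i _; congr 1; omega


-- closed form of A for a nonnegative argument
theorem pv_A_closed (n : Nat) : fibonacci_nums (n : Int) =
    ((List.range (n + 1)).map (fun i => pvN i)).reverse ++
      (List.range n).map (fun i => pvF (1 + i)) := by
  show ((PySem.List.pyRange 0 ((n : Int) + 1) 1).foldl (fun st _ => pvStepB st)
      (((PySem.List.pyRange 0 (n : Int) 1).foldl (fun st _ => pvStepA st) ([], 1, 1)).1, 0, 1)).1 = _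
  rw [pv_foldl_const, pv_foldl_const]
  have e1 : (PySem.List.pyRange 0 (n : Int) 1).length = n := by
    rw [PySem.List.length_pyRange_one]; omega
  have e2 : (PySem.List.pyRange 0 ((n : Int) + 1) 1).length = n + 1 := by
    rw [PySem.List.length_pyRange_one]; omega
  rw [e1, e2]
  have h11 : (([], 1, 1) : List Int × Int × Int) = ([], pvF 1, pvF 2) := by
    simp [pvF]
  rw [h11, pv_iterA n 1 []]
  have h01 : ∀ l : List Int, ((l, 0, 1) : List Int × Int × Int) = (l, pvN 0, (-1) ^ 0 * pvF 1) := by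
    intro l; simp [pvN, pvF]
  rw [h01, pv_iterB (n + 1) 0]
  simp

-- closed form of B for a nonnegative argument
theorem pv_B_closed (n : Nat) : fibonacci_nums_alt (n : Int) =
    (List.range n).map (fun k => pvN (n - k)) ++ (List.range (n + 1)).map (fun i => pvF i) := by
  show ((PySem.List.pyRange (n : Int) 0 (-1)).map
      (fun j => (-1) ^ (j + 1).toNat * PySem.List.pyGetD
        (((PySem.List.pyRange 0 ((n : Int) + 1) 1).foldl (fun st _ => pvStepA st) ([], 0, 1)).1) j 0)) ++
      ((PySem.List.pyRange 0 ((n : Int) + 1) 1).foldl (fun st _ => pvStepA st) ([], 0, 1)).1 = _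
  rw [pv_foldl_const]
  have e2 : (PySem.List.pyRange 0 ((n : Int) + 1) 1).length = n + 1 := by
    rw [PySem.List.length_pyRange_one]; omega
  rw [e2]
  have h01 : (([], 0, 1) : List Int × Int × Int) = ([], pvF 0, pvF 1) := by simp [pvF]
  rw [h01, pv_iterA (n + 1) 0]
  simp only [List.nil_append, Nat.zero_add]
  congr 1
  rw [PySem.List.pyRange_neg_one]
  have en : ((n : Int) - 0).toNat = n := by omega
  rw [en, List.map_map]
  apply List.map_congr_left
  intro k hk
  simp only [List.mem_range] at hk
  simp only [Function.comp]
  have hnn : (0 : Int) ≤ (n : Int) - k := by omega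
  rw [PySem.List.pyGetD_of_nonneg _ _ hnn]
  have ht : ((n : Int) - k).toNat = n - k := by omega
  have ht2 : ((n : Int) - k + 1).toNat = n - k + 1 := by omega
  rw [ht, ht2, PySem.List.getD_map_range _ _ _ _ (by omega)]
  simp [pvN]

theorem pv_main (num : Int) : fibonacci_nums num = fibonacci_nums_alt num := by
  by_cases h : num < 0
  · have h1 : PySem.List.pyRange 0 num 1 = [] := PySem.List.pyRange_one_eq_nil (by omega)
    have h2 : PySem.List.pyRange 0 (num + 1) 1 = [] := PySem.List.pyRange_one_eq_nil (by omega)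
    have h3 : PySem.List.pyRange num 0 (-1) = [] := PySem.List.pyRange_neg_one_eq_nil (by omega)
    simp [fibonacci_nums, fibonacci_nums_alt, h1, h2, h3]
  · push Not at h
    obtain ⟨n, rfl⟩ : ∃ n : Nat, num = (n : Int) := ⟨num.toNat, (Int.toNat_of_nonneg h).symm⟩
    rw [pv_A_closed, pv_B_closed]
    rw [pv_reverse_map_range]
    conv_lhs => rw [List.range_succ]
    conv_rhs => rw [List.range_succ_eq_map]
    rw [List.map_append, List.append_assoc]
    have hmid : List.map (fun k => pvN (n + 1 - 1 - k)) (List.range n)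
        = List.map (fun k => pvN (n - k)) (List.range n) := by
      simp
    have htail : List.map (fun k => pvN (n + 1 - 1 - k)) [n]
          ++ List.map (fun i => pvF (1 + i)) (List.range n)
        = List.map (fun i => pvF i) (0 :: List.map Nat.succ (List.range n)) := by
      have h0 : pvN (n + 1 - 1 - n) = pvF 0 := by simp [pvN, pvF]
      simp only [List.map_cons, List.map_nil, List.map_map, List.nil_append, List.cons_append,
        h0, List.cons.injEq, true_and]
      apply List.map_congr_left; intro i _
      simp only [Function.comp]
      congr 1; omega
    rw [hmid, htail]

-- ===== VERDICT (by name: the statement is the Claim_ definition above) =====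
theorem fibonacci_nums_spec : Claim_equal_fibonacci_nums := by
  intro num _
  unfold Spec_fibonacci_nums
  exact pv_main num
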